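-- pv_equiv track=rewrite | github.com/ralskwo/CodingTest | BAEKJOON/1365 - 꼬인 전깃줄/꼬인 전깃줄.py | minimum_cut_wires
-- ===== SOURCE A (Python) =====
-- from bisect import bisect_left  # 이분 탐색을 위한 bisect_left 함수 임포트
--
-- def minimum_cut_wires(N, poles):
--     lis = []  # 가장 긴 증가하는 부분 수열(LIS)을 저장할 리스트 초기화
--
--     for pole in poles:  # 전봇대 연결 상태를 하나씩 순회
--         pos = bisect_left(lis, pole)  # pole이 들어갈 위치를 이분 탐색으로 찾음
--         if pos == len(lis):  # 찾은 위치가 현재 LIS의 길이와 같다면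
--             lis.append(pole)  # 새로운 값을 LIS 끝에 추가
--         else:  # pole이 LIS의 중간에 들어갈 경우
--             lis[pos] = pole  # LIS에서 해당 위치의 값을 pole로 교체
--
--     return N - len(
--         lis
--     )  # 전체 전봇대 수에서 LIS의 길이를 뺀 값이 잘라야 할 최소 전선 개수
-- ===== SOURCE B (Python) =====
-- def minimum_cut_wires(N, poles):
--     n = len(poles)
--     dp = [1] * n
--     for i in range(n):
--         for j in range(i):
--             if poles[j] < poles[i] and dp[j] + 1 > dp[i]:
--                 dp[i] = dp[j] + 1
--     return N - max(dp, default=0)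
-- ===== Notes on version B (the rewrite author's own statement) =====
-- stated objective: simpler
-- what changed: Replaces the patience-sorting tails list with binary search (bisect_left) by a plain O(n^2) table-filling LIS DP (dp[i] = longest strictly increasing subsequence ending at i), returning N - max(dp, default=0).
import Mathlib
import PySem

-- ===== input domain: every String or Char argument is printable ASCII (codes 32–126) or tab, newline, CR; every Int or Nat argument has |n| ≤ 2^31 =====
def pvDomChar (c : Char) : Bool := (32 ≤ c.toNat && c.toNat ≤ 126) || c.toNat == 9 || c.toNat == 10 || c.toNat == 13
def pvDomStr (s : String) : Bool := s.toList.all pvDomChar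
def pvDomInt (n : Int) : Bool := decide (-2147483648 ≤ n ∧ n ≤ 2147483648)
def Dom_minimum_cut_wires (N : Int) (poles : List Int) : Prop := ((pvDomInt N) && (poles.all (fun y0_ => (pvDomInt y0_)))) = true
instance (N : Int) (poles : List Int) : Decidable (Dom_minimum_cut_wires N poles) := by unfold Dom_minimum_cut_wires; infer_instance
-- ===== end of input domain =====

-- B replaces A's patience-sorting tails list (bisect_left) by a plain O(n^2) table-filling LIS DP; objective: simpler.


-- ===== PORT A =====
-- one iteration of A's loop: bisect_left, then append or replace
def pvPStep (lis : List Int) (pole : Int) : List Int :=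
  let pos := PySem.List.bisectLeft lis pole
  if pos = lis.length then lis ++ [pole] else lis.set pos pole

def minimum_cut_wires (N : Int) (poles : List Int) : Int :=
  let lis := poles.foldl pvPStep []
  N - (lis.length : Int)

-- ===== PORT B =====
-- inner loop body for fixed outer index i: 'if poles[j] < poles[i] and dp[j] + 1 > dp[i]: dp[i] = dp[j] + 1'
def pvInner (poles : List Int) (i : Int) (dp : List Int) (j : Int) : List Int :=
  if PySem.List.pyGetD poles j 0 < PySem.List.pyGetD poles i 0 ∧
     PySem.List.pyGetD dp j 0 + 1 > PySem.List.pyGetD dp i 0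
  then PySem.List.pySetD dp i (PySem.List.pyGetD dp j 0 + 1) else dp

def minimum_cut_wires_alt (N : Int) (poles : List Int) : Int :=
  let n := poles.length
  let dp := (PySem.List.pyRange 0 (n : Int) 1).foldl
    (fun dp i => (PySem.List.pyRange 0 i 1).foldl (pvInner poles i) dp)
    (List.replicate n (1 : Int))
  N - PySem.List.maxD dp (fun y => y) 0

-- ===== PRECONDITION & SPEC =====
def Spec_minimum_cut_wires (N : Int) (poles : List Int) (out : Int) : Prop := out = minimum_cut_wires_alt N poles
instance (N : Int) (poles : List Int) (out : Int) : Decidable (Spec_minimum_cut_wires N poles out) := by unfold Spec_minimum_cut_wires; infer_instance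

-- ===== CLAIM (what is proved, stated in full; the proofs are below) =====
def Claim_equal_minimum_cut_wires : Prop := ∀ (N : Int) (poles : List Int), Dom_minimum_cut_wires N poles → Spec_minimum_cut_wires N poles (minimum_cut_wires N poles)

-- ===== LEMMAS AND PROOFS =====

-- Common abstract description: fL xs = (f, L) where f v = length of the longest strictly
-- increasing subsequence of xs whose last element is < v, and L = LIS length of xs.
def pvFStep (st : (Int → Nat) × Nat) (x : Int) : (Int → Nat) × Nat :=
  ((fun v => if x < v then max (st.1 v) (st.1 x + 1) else st.1 v), max st.2 (st.1 x + 1))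

def pvFL (xs : List Int) : (Int → Nat) × Nat := xs.foldl pvFStep ((fun _ => 0), 0)

theorem pvFL_snoc (xs : List Int) (x : Int) : pvFL (xs ++ [x]) = pvFStep (pvFL xs) x := by
  simp [pvFL, List.foldl_append]

-- bisectLeft is determined by the two bracketing properties on a sorted list
theorem pvBisect_unique (t : List Int) (hs : t.Pairwise (· ≤ ·)) (v : Int) (p : Nat)
    (hp : p ≤ t.length)
    (h1 : ∀ j (hj : j < t.length), j < p → t[j] < v)
    (h2 : ∀ j (hj : j < t.length), p ≤ j → v ≤ t[j]) :
    PySem.List.bisectLeft t v = p := by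
  obtain ⟨hb, hb1, hb2⟩ := PySem.List.bisectLeft_spec t v hs
  by_contra hne
  rcases Nat.lt_or_ge (PySem.List.bisectLeft t v) p with h | h
  · have hj : PySem.List.bisectLeft t v < t.length := lt_of_lt_of_le h hp
    have := h1 _ hj h
    have := hb2 _ hj (le_refl _)
    omega
  · have hlt : p < PySem.List.bisectLeft t v := lt_of_le_of_ne h (fun e => hne e.symm)
    have hj : p < t.length := lt_of_lt_of_le hlt hb
    have := hb1 _ hj hlt
    have := h2 _ hj (le_refl _)
    omega

-- A-side invariant: the tails list is sorted, its length is L, and bisectLeft on it computes f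
theorem pvA_inv (xs : List Int) :
    (xs.foldl pvPStep []).Pairwise (· ≤ ·) ∧
    (xs.foldl pvPStep []).length = (pvFL xs).2 ∧
    (∀ v, PySem.List.bisectLeft (xs.foldl pvPStep []) v = (pvFL xs).1 v) := by
  induction xs using List.reverseRecOn with
  | nil =>
    refine ⟨by simp, by simp [pvFL], fun v => ?_⟩
    exact pvBisect_unique [] (by simp) v 0 (by simp) (by simp) (by simp)
  | append_singleton xs x ih =>
    obtain ⟨hs, hlen, hbl⟩ := ih
    rw [List.foldl_append, pvFL_snoc]
    simp only [List.foldl_cons, List.foldl_nil]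
    set t := xs.foldl pvPStep [] with ht
    set f := (pvFL xs).1 with hf
    set L := (pvFL xs).2 with hL
    have hmono : ∀ i j (hi : i < t.length) (hj : j < t.length), i ≤ j → t[i] ≤ t[j] := by
      intro i j hi hj hij
      rcases Nat.eq_or_lt_of_le hij with h | h
      · subst h; exact le_refl _
      · exact (List.pairwise_iff_getElem.mp hs) i j hi hj h
    have hfle : ∀ v, f v ≤ L := by
      intro v
      rw [← hbl v, ← hlen]
      exact (PySem.List.bisectLeft_spec t v hs).1
    obtain ⟨hxle, hx1, hx2⟩ := PySem.List.bisectLeft_spec t x hs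
    rw [hbl x] at hxle hx1 hx2
    simp only [pvPStep, hbl x]
    by_cases hpos : f x = t.length
    · -- append case: every element of t is < x
      rw [if_pos hpos]
      have hall : ∀ a ∈ t, a ≤ x := by
        intro a ha
        obtain ⟨j, hj, rfl⟩ := List.mem_iff_getElem.mp ha
        exact le_of_lt (hx1 j hj (by omega))
      have hs' : (t ++ [x]).Pairwise (· ≤ ·) := by
        rw [List.pairwise_append]
        exact ⟨hs, List.pairwise_singleton _ _, by simpa using hall⟩
      refine ⟨hs', by
        simp only [pvFStep, ← hf, ← hL, List.length_append, List.length_cons,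
          List.length_nil]
        omega, fun v => ?_⟩
      simp only [pvFStep, ← hf, ← hL]
      by_cases hv : x < v
      · rw [if_pos hv]
        have hfv : max (f v) (f x + 1) = t.length + 1 := by
          have := hfle v; omega
        rw [hfv]
        refine pvBisect_unique (t ++ [x]) hs' v (t.length + 1) (by simp) ?_ ?_
        · intro j hj _
          rcases Nat.lt_or_ge j t.length with h | h
          · rw [List.getElem_append_left h]
            exact lt_trans (hx1 j h (by omega)) hv
          · have hj' : j = t.length := by simp at hj; omega
            subst hj'
            simp [hv]
        · intro j hj hle
          simp at hj; omega
      · rw [if_neg hv]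
        refine pvBisect_unique (t ++ [x]) hs' v (f v) (by simp; have := hfle v; omega) ?_ ?_
        · intro j hj hlt
          have hjt : j < t.length := by have := hfle v; omega
          rw [List.getElem_append_left hjt]
          have hq := (PySem.List.bisectLeft_spec t v hs).2.1
          rw [hbl v] at hq
          exact hq j hjt hlt
        · intro j hj hle
          rcases Nat.lt_or_ge j t.length with h | h
          · rw [List.getElem_append_left h]
            have hq := (PySem.List.bisectLeft_spec t v hs).2.2
            rw [hbl v] at hq
            exact hq j h hle
          · have hj' : j = t.length := by simp at hj; omega
            subst hj'
            simpa using le_of_not_gt hv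
    · -- replace case: t.set (f x) x
      rw [if_neg hpos]
      have hposlt : f x < t.length := lt_of_le_of_ne hxle hpos
      have hs' : (t.set (f x) x).Pairwise (· ≤ ·) := by
        rw [List.pairwise_iff_getElem]
        intro i j hi hj hij
        simp only [List.length_set] at hi hj
        rw [List.getElem_set, List.getElem_set]
        by_cases hip : f x = i
        · rw [if_pos hip, if_neg (by omega)]
          exact hx2 j hj (by omega)
        · rw [if_neg hip]
          by_cases hjp : f x = j
          · rw [if_pos hjp]
            exact le_of_lt (hx1 i hi (by omega))
          · rw [if_neg hjp]
            exact hmono i j hi hj (le_of_lt hij)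
      refine ⟨hs', by
        simp only [pvFStep, ← hf, ← hL, List.length_set]
        have := hfle x; omega, fun v => ?_⟩
      simp only [pvFStep, ← hf, ← hL]
      have hq1 := (PySem.List.bisectLeft_spec t v hs).2.1
      have hq2 := (PySem.List.bisectLeft_spec t v hs).2.2
      have hqle := (PySem.List.bisectLeft_spec t v hs).1
      rw [hbl v] at hq1 hq2 hqle
      by_cases hv : x < v
      · rw [if_pos hv]
        rcases Nat.lt_or_ge (f x) (f v) with hc | hc
        · -- t[f x] < v already: position unchanged
          have hmax : max (f v) (f x + 1) = f v := by omega
          rw [hmax]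
          refine pvBisect_unique _ hs' v (f v) (by simp; omega) ?_ ?_
          · intro j hj hlt
            simp only [List.length_set] at hj
            rw [List.getElem_set]
            by_cases hjp : f x = j
            · rw [if_pos hjp]; exact hv
            · rw [if_neg hjp]; exact hq1 j hj hlt
          · intro j hj hle
            simp only [List.length_set] at hj
            rw [List.getElem_set, if_neg (by omega)]
            exact hq2 j hj hle
        · -- new chain ends at position f x
          have hmax : max (f v) (f x + 1) = f x + 1 := by omega
          rw [hmax]
          refine pvBisect_unique _ hs' v (f x + 1) (by simp; omega) ?_ ?_
          · intro j hj hlt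
            simp only [List.length_set] at hj
            rw [List.getElem_set]
            by_cases hjp : f x = j
            · rw [if_pos hjp]; exact hv
            · rw [if_neg hjp]
              exact lt_trans (hx1 j hj (by omega)) hv
          · intro j hj hle
            simp only [List.length_set] at hj
            rw [List.getElem_set, if_neg (by omega)]
            exact hq2 j hj (by omega)
      · rw [if_neg hv]
        have hvlex : v ≤ x := le_of_not_gt hv
        have hfvle : f v ≤ f x := by
          by_contra hcon
          have : t[f x] < v := hq1 (f x) hposlt (by omega)
          have : x ≤ t[f x] := hx2 (f x) hposlt (le_refl _)
          omega
        refine pvBisect_unique _ hs' v (f v) (by simp; omega) ?_ ?_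
        · intro j hj hlt
          simp only [List.length_set] at hj
          rw [List.getElem_set, if_neg (by omega)]
          exact hq1 j hj hlt
        · intro j hj hle
          simp only [List.length_set] at hj
          rw [List.getElem_set]
          by_cases hjp : f x = j
          · rw [if_pos hjp]; exact hvlex
          · rw [if_neg hjp]; exact hq2 j hj hle

-- B-side: value of the DP cell i
def pvDpv (poles : List Int) (i : Nat) : Nat := (pvFL (poles.take i)).1 (poles.getD i 0) + 1

-- reads/writes on the dp list 'A ++ c :: R' at natural indices
theorem pvGet_left (A : List Int) (c : Int) (R : List Int) (j : Nat) (hj : j < A.length) :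
    PySem.List.pyGetD (A ++ c :: R) (j : Int) 0 = A.getD j 0 := by
  simp only [PySem.List.pyGetD_natCast]
  exact List.getD_append A (c :: R) 0 j hj

theorem pvGet_mid (A : List Int) (c : Int) (R : List Int) (m : Nat) (hA : A.length = m) :
    PySem.List.pyGetD (A ++ c :: R) (m : Int) 0 = c := by
  subst hA; simp

theorem pvSet_mid (A : List Int) (c v : Int) (R : List Int) (m : Nat) (hA : A.length = m) :
    PySem.List.pySetD (A ++ c :: R) (m : Int) v = A ++ v :: R := by
  subst hA
  simp only [PySem.List.pySetD_natCast]
  rw [List.set_append_right _ _ (le_refl _)]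
  simp

theorem pvInner_loop (poles : List Int) (m : Nat) (hm : m < poles.length) (R : List Int)
    (k : Nat) (hk : k ≤ m) :
    (PySem.List.pyRange 0 (k : Int) 1).foldl (pvInner poles (m : Int))
      ((List.range m).map (fun i => (pvDpv poles i : Int)) ++ (1 : Int) :: R) =
    (List.range m).map (fun i => (pvDpv poles i : Int)) ++
      (((pvFL (poles.take k)).1 (poles.getD m 0) + 1 : Nat) : Int) :: R := by
  induction k with
  | zero =>
    simp [pvFL]
  | succ k ih =>
    have hk' : k < m := hk
    have hkp : k < poles.length := lt_trans hk' hm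
    have hA : ((List.range m).map (fun i => (pvDpv poles i : Int))).length = m := by simp
    have hrange : PySem.List.pyRange 0 ((k + 1 : Nat) : Int) 1 =
        PySem.List.pyRange 0 (k : Nat) 1 ++ [(k : Int)] := by
      push_cast
      exact PySem.List.pyRange_one_succ_right (Int.natCast_nonneg k)
    rw [hrange, List.foldl_append, ih (le_of_lt hk')]
    simp only [List.foldl_cons, List.foldl_nil, pvInner]
    have hgk : PySem.List.pyGetD ((List.range m).map (fun i => (pvDpv poles i : Int)) ++
        (((pvFL (poles.take k)).1 (poles.getD m 0) + 1 : Nat) : Int) :: R) (k : Int) 0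
        = (pvDpv poles k : Int) := by
      rw [pvGet_left _ _ _ k (by simp [hk'])]
      simp [List.getD_eq_getElem?_getD, List.getElem?_range hk']
    have hgm : PySem.List.pyGetD ((List.range m).map (fun i => (pvDpv poles i : Int)) ++
        (((pvFL (poles.take k)).1 (poles.getD m 0) + 1 : Nat) : Int) :: R) (m : Int) 0
        = (((pvFL (poles.take k)).1 (poles.getD m 0) + 1 : Nat) : Int) := by
      exact pvGet_mid _ _ _ m hA
    have hpk : PySem.List.pyGetD poles (k : Int) 0 = poles.getD k 0 := by simp
    have hpm : PySem.List.pyGetD poles (m : Int) 0 = poles.getD m 0 := by simp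
    have htake : poles.take (k + 1) = poles.take k ++ [poles.getD k 0] := by
      rw [List.take_add_one]
      simp [List.getD_eq_getElem?_getD, List.getElem?_eq_getElem hkp]
    have hdpv : pvDpv poles k = (pvFL (List.take k poles)).1 (poles.getD k 0) + 1 := rfl
    rw [hgk, hgm, hpk, hpm, htake, pvFL_snoc, hdpv]
    simp only [pvFStep]
    by_cases hlt : poles.getD k 0 < poles.getD m 0
    · by_cases hgt : ((pvFL (poles.take k)).1 (poles.getD k 0) + 1 : Nat) + 1 >
          ((pvFL (poles.take k)).1 (poles.getD m 0) + 1 : Nat)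
      · rw [if_pos ⟨hlt, by exact_mod_cast hgt⟩]
        rw [pvSet_mid _ _ _ _ m hA]
        simp only [if_pos hlt]
        have hval : (max ((pvFL (poles.take k)).1 (poles.getD m 0))
            ((pvFL (poles.take k)).1 (poles.getD k 0) + 1) + 1 : Nat)
            = ((pvFL (poles.take k)).1 (poles.getD k 0) + 1) + 1 := by omega
        rw [hval]
        push_cast
        ring_nf
      · rw [if_neg (fun hc => hgt (by exact_mod_cast hc.2))]
        simp only [if_pos hlt]
        have hval : (max ((pvFL (poles.take k)).1 (poles.getD m 0))
            ((pvFL (poles.take k)).1 (poles.getD k 0) + 1) + 1 : Nat)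
            = (pvFL (poles.take k)).1 (poles.getD m 0) + 1 := by omega
        rw [hval]
    · rw [if_neg (by tauto), if_neg hlt]

theorem pvOuter_loop (poles : List Int) (m : Nat) (hm : m ≤ poles.length) :
    (PySem.List.pyRange 0 (m : Int) 1).foldl
      (fun dp i => (PySem.List.pyRange 0 i 1).foldl (pvInner poles i) dp)
      (List.replicate poles.length (1 : Int)) =
    (List.range m).map (fun i => (pvDpv poles i : Int)) ++
      List.replicate (poles.length - m) (1 : Int) := by
  induction m with
  | zero => simp
  | succ m ih =>
    have hm' : m < poles.length := hm
    have hrange : PySem.List.pyRange 0 ((m + 1 : Nat) : Int) 1 =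
        PySem.List.pyRange 0 (m : Nat) 1 ++ [(m : Int)] := by
      push_cast
      exact PySem.List.pyRange_one_succ_right (Int.natCast_nonneg m)
    rw [hrange, List.foldl_append, ih (le_of_lt hm')]
    simp only [List.foldl_cons, List.foldl_nil]
    have hrep : List.replicate (poles.length - m) (1 : Int)
        = (1 : Int) :: List.replicate (poles.length - (m + 1)) (1 : Int) := by
      have : poles.length - m = (poles.length - (m + 1)) + 1 := by omega
      rw [this, List.replicate_succ]
    rw [hrep, pvInner_loop poles m hm' _ m (le_refl m)]
    rw [List.range_succ, List.map_append, List.append_assoc]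
    rfl

theorem pvFoldMax_eq (poles : List Int) (m : Nat) (hm : m ≤ poles.length) :
    ((List.range m).map (fun i => (pvDpv poles i : Int))).foldl max 0
      = ((pvFL (poles.take m)).2 : Int) := by
  induction m with
  | zero => simp [pvFL]
  | succ m ih =>
    have hm' : m < poles.length := hm
    have htake : poles.take (m + 1) = poles.take m ++ [poles[m]] := by
      rw [List.take_add_one]; simp [List.getElem?_eq_getElem hm']
    rw [List.range_succ, List.map_append, List.foldl_append, ih (le_of_lt hm'), htake,
        pvFL_snoc]
    simp only [List.map_cons, List.map_nil, List.foldl_cons, List.foldl_nil, pvFStep, pvDpv]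
    rw [List.getD_eq_getElem poles 0 hm']
    omega

theorem pvMaxD_eq (poles : List Int) :
    PySem.List.maxD ((List.range poles.length).map (fun i => (pvDpv poles i : Int))) (fun y => y) 0
      = ((pvFL poles).2 : Int) := by
  have h := pvFoldMax_eq poles poles.length (le_refl _)
  rw [List.take_length] at h
  rw [← h]
  cases hn : poles.length with
  | zero => simp [PySem.List.maxD, PySem.List.max?]
  | succ k =>
    rw [List.range_succ_eq_map]
    simp only [List.map_cons]
    rw [PySem.List.maxD, PySem.List.max?_id_cons]
    simp only [Option.getD_some, List.foldl_cons]
    have h0 : (0 : Int) ⊔ (pvDpv poles 0 : Int) = (pvDpv poles 0 : Int) := by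
      simp [pvDpv]
    rw [h0]

-- ===== VERDICT (by name: the statement is the Claim_ definition above) =====
theorem minimum_cut_wires_spec : Claim_equal_minimum_cut_wires := by
  intro N poles _
  unfold Spec_minimum_cut_wires minimum_cut_wires minimum_cut_wires_alt
  dsimp only
  rw [pvOuter_loop poles poles.length (le_refl _)]
  simp only [Nat.sub_self, List.replicate_zero, List.append_nil]
  rw [pvMaxD_eq, (pvA_inv poles).2.1]
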